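-- pv_equiv track=rewrite | github.com/OsOrtizM/100diasdepython | day_54.py | list_to_count_vowels_to_dictionary
-- ===== SOURCE A (Python) =====
-- def list_to_count_vowels_to_dictionary(list_input):
--     dicc_output = {}
--     for item in list_input:
--         count_vowel = 0
--         for char in item:
--             if char in 'AEIOUaeiou':
--                 count_vowel += 1
--         dicc_output[item] = count_vowel
--     return dicc_output
-- ===== SOURCE B (Python) =====
-- def list_to_count_vowels_to_dictionary(list_input):
--     return {item: sum(item.count(v) for v in 'aeiouAEIOU') for item in list_input}
-- ===== Notes on version B (the rewrite author's own statement) =====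
-- stated objective: idiomatic
-- what changed: Replaces the explicit dict-building loop with a per-character membership scan by a dict comprehension whose value is the sum of ten str.count calls, one per vowel (repeated whole-string scans instead of a single character-by-character scan).
import Mathlib
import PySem

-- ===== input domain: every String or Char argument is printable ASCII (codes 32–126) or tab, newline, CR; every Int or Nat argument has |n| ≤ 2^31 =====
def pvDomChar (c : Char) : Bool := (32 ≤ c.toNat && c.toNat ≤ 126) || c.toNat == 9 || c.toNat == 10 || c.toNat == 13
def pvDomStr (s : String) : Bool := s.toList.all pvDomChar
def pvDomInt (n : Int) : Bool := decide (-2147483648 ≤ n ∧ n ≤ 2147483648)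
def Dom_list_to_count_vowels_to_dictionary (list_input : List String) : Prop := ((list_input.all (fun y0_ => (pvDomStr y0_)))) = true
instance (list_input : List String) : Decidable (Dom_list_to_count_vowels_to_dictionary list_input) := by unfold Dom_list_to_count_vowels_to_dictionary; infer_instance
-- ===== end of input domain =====

-- B builds the dict by a comprehension, counting each string's vowels as the sum of ten
-- per-vowel str.count scans instead of A's single character-by-character scan (idiomatic).

-- ===== PORT A =====
-- 'char in "AEIOUaeiou"' on the 1-char strings a for-loop over a str yields = list membership
def list_to_count_vowels_to_dictionary (list_input : List String) : List (String × Int) :=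
  (list_input.foldl (fun dicc_output item =>
      dicc_output.insert item
        (item.toList.foldl
          (fun count_vowel char =>
            if ("AEIOUaeiou".toList.contains char) then count_vowel + 1 else count_vowel)
          (0 : Int)))
    PySem.Dict.empty).items

-- ===== PORT B =====
def list_to_count_vowels_to_dictionary_alt (list_input : List String) : List (String × Int) :=
  (list_input.foldl (fun d item =>
      d.insert item
        (("aeiouAEIOU".toList.map
            (fun v => (PySem.Str.count item (String.ofList [v]) : Int))).sum))
    PySem.Dict.empty).items

-- ===== PRECONDITION & SPEC =====
def Spec_list_to_count_vowels_to_dictionary (list_input : List String) (out : List (String × Int)) : Prop := out = list_to_count_vowels_to_dictionary_alt list_input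
instance (list_input : List String) (out : List (String × Int)) : Decidable (Spec_list_to_count_vowels_to_dictionary list_input out) := by unfold Spec_list_to_count_vowels_to_dictionary; infer_instance

-- ===== CLAIM (what is proved, stated in full; the proofs are below) =====
def Claim_equal_list_to_count_vowels_to_dictionary : Prop := ∀ (list_input : List String), Dom_list_to_count_vowels_to_dictionary list_input → Spec_list_to_count_vowels_to_dictionary list_input (list_to_count_vowels_to_dictionary list_input)

-- ===== LEMMAS AND PROOFS =====

-- count.go with a single-character pattern counts occurrences of that character
lemma pv_count_go_single (c : Char) : ∀ (fuel : Nat) (l : List Char) (acc : Nat),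
    l.length ≤ fuel → PySem.Chars.count.go [c] fuel l acc = acc + l.count c := by
  intro fuel
  induction fuel with
  | zero =>
    intro l acc h
    have : l = [] := List.eq_nil_of_length_eq_zero (Nat.le_zero.mp h)
    subst this; simp [PySem.Chars.count.go]
  | succ n ih =>
    intro l acc h
    cases l with
    | nil => simp [PySem.Chars.count.go]
    | cons hd t =>
      by_cases hc : hd = c
      · subst hc
        simp only [PySem.Chars.count.go, List.isPrefixOf, BEq.rfl, Bool.true_and, if_true,
          List.length_cons, List.length_nil, List.drop_succ_cons, List.drop_zero]
        rw [ih t (acc + 1) (by simpa using h)]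
        simp
        omega
      · have hbe : (c == hd) = false := by
          simp only [beq_eq_false_iff_ne]; exact fun e => hc e.symm
        simp only [PySem.Chars.count.go, List.isPrefixOf, hbe, Bool.false_and]
        rw [ih t acc (by simpa using h)]
        simp [List.count_cons]
        exact hc

lemma pv_chars_count_single (l : List Char) (c : Char) :
    PySem.Chars.count l [c] = l.count c := by
  rw [PySem.Chars.count]
  simpa using pv_count_go_single c l.length l 0 le_rfl

lemma pv_countP_disjoint (v : Char) (vs : List Char) (hv : v ∉ vs) (l : List Char) :
    l.countP (fun ch => ch == v || vs.contains ch)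
      = l.count v + l.countP (fun ch => vs.contains ch) := by
  induction l with
  | nil => simp
  | cons a l ih =>
    by_cases ha : a = v
    · subst ha
      have hnc : vs.contains a = false := by simpa using hv
      rw [List.countP_cons, List.countP_cons, List.count_cons, ih]
      simp only [BEq.rfl, Bool.true_or, hnc, Bool.false_eq_true, if_true, if_false]
      omega
    · have hbe : (a == v) = false := by simpa using ha
      rw [List.countP_cons, List.countP_cons, List.count_cons, ih]
      simp only [hbe, Bool.false_or, Bool.false_eq_true, if_false]
      split_ifs <;> omega

lemma pv_countP_mem_eq_sum (vs : List Char) (hnd : vs.Nodup) (l : List Char) :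
    (l.countP (fun ch => vs.contains ch) : Int)
      = (vs.map (fun v => (l.count v : Int))).sum := by
  induction vs with
  | nil => simp
  | cons v vs ih =>
    have hv : v ∉ vs := (List.nodup_cons.mp hnd).1
    rw [show (fun ch => (v :: vs).contains ch) = (fun ch => ch == v || vs.contains ch)
          from funext fun ch => List.contains_cons,
        pv_countP_disjoint v vs hv l,
        List.map_cons, List.sum_cons, ← ih ((List.nodup_cons.mp hnd).2)]
    push_cast
    ring

lemma pv_item_counts (item : String) :
    item.toList.foldl
        (fun count_vowel char =>
          if ("AEIOUaeiou".toList.contains char) then count_vowel + 1 else count_vowel)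
        (0 : Int)
      = (("aeiouAEIOU".toList.map
            (fun v => (PySem.Str.count item (String.ofList [v]) : Int))).sum) := by
  rw [PySem.List.foldl_if_add_one]
  have hB : ("aeiouAEIOU".toList.map
      (fun v => (PySem.Str.count item (String.ofList [v]) : Int)))
      = ("aeiouAEIOU".toList.map (fun v => (item.toList.count v : Int))) := by
    apply List.map_congr_left
    intro v _
    have : (String.ofList [v]).toList = [v] := by simp
    simp only [PySem.Str.count_eq, this, pv_chars_count_single]
  rw [hB]
  have hperm : ("AEIOUaeiou".toList.map (fun v => (item.toList.count v : Int))).Perm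
      ("aeiouAEIOU".toList.map (fun v => (item.toList.count v : Int))) :=
    List.Perm.map _ (by decide)
  rw [← hperm.sum_eq, ← pv_countP_mem_eq_sum _ (by decide), Int.zero_add]

-- ===== VERDICT (by name: the statement is the Claim_ definition above) =====
theorem list_to_count_vowels_to_dictionary_spec : Claim_equal_list_to_count_vowels_to_dictionary := by
  intro list_input _
  unfold Spec_list_to_count_vowels_to_dictionary
  unfold list_to_count_vowels_to_dictionary list_to_count_vowels_to_dictionary_alt
  congr 2
  funext d item
  rw [pv_item_counts]
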